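-- pv_equiv track=rewrite | github.com/JLORep/ProjectTrench | intelligent_data_aggregator.py | _get_metric_category
-- ===== SOURCE A (Python) =====
-- def _get_metric_category(metric_type: str) -> str:
--     """Determine which category a metric belongs to"""
--     categories = {
--         'core_metrics': ['price', 'volume_24h', 'market_cap', 'fdv', 'price_change_24h', 'price_change_pct_24h'],
--         'technical_indicators': ['rsi', 'macd', 'bollinger_upper', 'bollinger_lower', 'ema_20', 'sma_50', 'sma_200'],
--         'social_metrics': ['twitter_followers', 'reddit_subscribers', 'telegram_members', 'social_score', 'sentiment_score'],
--         'security_analysis': ['security_score', 'honeypot', 'rugpull_risk', 'contract_verified'],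
--         'defi_metrics': ['tvl', 'liquidity', 'apy', 'pool_count'],
--         'whale_activity': ['whale_transactions', 'whale_holdings', 'smart_money_flow']
--     }
--
--     for category, metrics in categories.items():
--         if metric_type in metrics:
--             return category
--
--     return 'other_metrics'
-- ===== SOURCE B (Python) =====
-- # Sorted lookup table (metric name ascending) answered by hand-rolled binary search.
-- _SORTED_METRICS = [
--     ("apy", "defi_metrics"),
--     ("bollinger_lower", "technical_indicators"),
--     ("bollinger_upper", "technical_indicators"),
--     ("contract_verified", "security_analysis"),
--     ("ema_20", "technical_indicators"),
--     ("fdv", "core_metrics"),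
--     ("honeypot", "security_analysis"),
--     ("liquidity", "defi_metrics"),
--     ("macd", "technical_indicators"),
--     ("market_cap", "core_metrics"),
--     ("pool_count", "defi_metrics"),
--     ("price", "core_metrics"),
--     ("price_change_24h", "core_metrics"),
--     ("price_change_pct_24h", "core_metrics"),
--     ("reddit_subscribers", "social_metrics"),
--     ("rsi", "technical_indicators"),
--     ("rugpull_risk", "security_analysis"),
--     ("security_score", "security_analysis"),
--     ("sentiment_score", "social_metrics"),
--     ("sma_200", "technical_indicators"),
--     ("sma_50", "technical_indicators"),
--     ("smart_money_flow", "whale_activity"),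
--     ("social_score", "social_metrics"),
--     ("telegram_members", "social_metrics"),
--     ("tvl", "defi_metrics"),
--     ("twitter_followers", "social_metrics"),
--     ("volume_24h", "core_metrics"),
--     ("whale_holdings", "whale_activity"),
--     ("whale_transactions", "whale_activity"),
-- ]
--
-- def _get_metric_category(metric_type: str) -> str:
--     """Determine which category a metric belongs to"""
--     lo, hi = 0, len(_SORTED_METRICS)
--     while lo < hi:
--         mid = (lo + hi) // 2
--         if _SORTED_METRICS[mid][0] < metric_type:
--             lo = mid + 1
--         else:
--             hi = mid
--     if lo < len(_SORTED_METRICS) and _SORTED_METRICS[lo][0] == metric_type: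
--         return _SORTED_METRICS[lo][1]
--     return 'other_metrics'
-- ===== Notes on version B (the rewrite author's own statement) =====
-- stated objective: alternative
-- what changed: Replaces A's linear scan over category lists by a flat table sorted by metric name queried with a hand-rolled binary search (bisect_left) plus one final equality check against the found slot.
import Mathlib
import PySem

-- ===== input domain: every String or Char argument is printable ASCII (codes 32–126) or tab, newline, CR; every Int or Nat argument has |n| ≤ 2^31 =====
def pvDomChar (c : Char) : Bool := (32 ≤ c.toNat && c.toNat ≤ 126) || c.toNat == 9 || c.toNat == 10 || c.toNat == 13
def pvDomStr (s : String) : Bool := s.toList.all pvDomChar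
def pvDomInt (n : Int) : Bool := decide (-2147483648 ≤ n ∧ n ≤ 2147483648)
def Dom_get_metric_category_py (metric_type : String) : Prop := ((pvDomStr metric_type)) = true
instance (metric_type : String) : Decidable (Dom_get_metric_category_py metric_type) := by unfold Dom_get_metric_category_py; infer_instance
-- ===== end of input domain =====

-- B replaces A's linear scan over category lists by binary search (bisect_left) on a flat
-- table sorted by metric name; same return value, different algorithm.

-- ===== PORT A =====
-- the categories dict of A, as an insertion-ordered association list
def pvCategoriesA : List (String × List String) :=
  [("core_metrics", ["price", "volume_24h", "market_cap", "fdv", "price_change_24h", "price_change_pct_24h"]),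
   ("technical_indicators", ["rsi", "macd", "bollinger_upper", "bollinger_lower", "ema_20", "sma_50", "sma_200"]),
   ("social_metrics", ["twitter_followers", "reddit_subscribers", "telegram_members", "social_score", "sentiment_score"]),
   ("security_analysis", ["security_score", "honeypot", "rugpull_risk", "contract_verified"]),
   ("defi_metrics", ["tvl", "liquidity", "apy", "pool_count"]),
   ("whale_activity", ["whale_transactions", "whale_holdings", "smart_money_flow"])]

-- the 'for category, metrics in categories.items(): if metric_type in metrics: return category' loop
def pvLoopA (metric_type : String) : List (String × List String) → String
  | [] => "other_metrics"
  | (category, metrics) :: rest =>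
      if metrics.contains metric_type then category else pvLoopA metric_type rest

def get_metric_category_py (metric_type : String) : String :=
  pvLoopA metric_type pvCategoriesA

-- ===== PORT B =====
-- B's module-level table _SORTED_METRICS (sorted by metric name)
def pvSortedMetrics : List (String × String) :=
  [("apy", "defi_metrics"),
   ("bollinger_lower", "technical_indicators"),
   ("bollinger_upper", "technical_indicators"),
   ("contract_verified", "security_analysis"),
   ("ema_20", "technical_indicators"),
   ("fdv", "core_metrics"),
   ("honeypot", "security_analysis"),
   ("liquidity", "defi_metrics"),
   ("macd", "technical_indicators"),
   ("market_cap", "core_metrics"),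
   ("pool_count", "defi_metrics"),
   ("price", "core_metrics"),
   ("price_change_24h", "core_metrics"),
   ("price_change_pct_24h", "core_metrics"),
   ("reddit_subscribers", "social_metrics"),
   ("rsi", "technical_indicators"),
   ("rugpull_risk", "security_analysis"),
   ("security_score", "security_analysis"),
   ("sentiment_score", "social_metrics"),
   ("sma_200", "technical_indicators"),
   ("sma_50", "technical_indicators"),
   ("smart_money_flow", "whale_activity"),
   ("social_score", "social_metrics"),
   ("telegram_members", "social_metrics"),
   ("tvl", "defi_metrics"),
   ("twitter_followers", "social_metrics"),
   ("volume_24h", "core_metrics"),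
   ("whale_holdings", "whale_activity"),
   ("whale_transactions", "whale_activity")]

-- Python's 's < t' on strings: lexicographic comparison of the code-point sequences
-- (exact on the ASCII domain; ported by hand over List Char)
def pvStrLt : List Char → List Char → Bool
  | [], [] => false
  | [], _ :: _ => true
  | _ :: _, [] => false
  | a :: as, b :: bs => if a < b then true else if b < a then false else pvStrLt as bs

-- B's 'while lo < hi' bisect_left loop. The fuel argument only makes the loop total: each
-- iteration strictly shrinks hi - lo, and the loop starts with fuel = length ≥ hi - lo,
-- so the fuel never runs out on the calls B makes. mid is always < hi ≤ length, so the
-- getD "" default of the _SORTED_METRICS[mid][0] index is never taken.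
def pvBisect (m : String) : Nat → Nat → Nat → Nat
  | 0, lo, _ => lo
  | fuel + 1, lo, hi =>
      if lo < hi then
        let mid := (lo + hi) / 2
        if pvStrLt ((((pvSortedMetrics[mid]?).map Prod.fst).getD "").toList) m.toList then
          pvBisect m fuel (mid + 1) hi
        else
          pvBisect m fuel lo mid
      else lo

-- 'if lo < len(_SORTED_METRICS) and _SORTED_METRICS[lo][0] == metric_type: …'
def get_metric_category_py_alt (metric_type : String) : String :=
  match pvSortedMetrics[pvBisect metric_type pvSortedMetrics.length 0 pvSortedMetrics.length]? with
  | some kc => if kc.1 == metric_type then kc.2 else "other_metrics"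
  | none => "other_metrics"

-- ===== PRECONDITION & SPEC =====
def Spec_get_metric_category_py (metric_type : String) (out : String) : Prop := out = get_metric_category_py_alt metric_type
instance (metric_type : String) (out : String) : Decidable (Spec_get_metric_category_py metric_type out) := by unfold Spec_get_metric_category_py; infer_instance

-- ===== CLAIM (what is proved, stated in full; the proofs are below) =====
def Claim_equal_get_metric_category_py : Prop := ∀ (metric_type : String), Dom_get_metric_category_py metric_type → Spec_get_metric_category_py metric_type (get_metric_category_py metric_type)

-- ===== LEMMAS AND PROOFS =====

-- if the queried string equals no key of the table, B returns the default
theorem pvAltNotFound (m : String)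
    (h : pvSortedMetrics.all (fun p => p.1 != m) = true) :
    get_metric_category_py_alt m = "other_metrics" := by
  unfold get_metric_category_py_alt
  cases hg : pvSortedMetrics[pvBisect m pvSortedMetrics.length 0 pvSortedMetrics.length]? with
  | none => rfl
  | some kc =>
    have hmem : kc ∈ pvSortedMetrics := List.mem_of_getElem? hg
    have hne := List.all_eq_true.mp h kc hmem
    simp only [bne_iff_ne, ne_eq] at hne
    simp [beq_eq_false_iff_ne.mpr hne]

-- ===== VERDICT (by name: the statement is the Claim_ definition above) =====
set_option maxHeartbeats 1000000 in
theorem get_metric_category_py_spec : Claim_equal_get_metric_category_py := by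
  intro m _
  unfold Spec_get_metric_category_py
  by_cases h1 : m = "price"
  · subst h1; decide
  by_cases h2 : m = "volume_24h"
  · subst h2; decide
  by_cases h3 : m = "market_cap"
  · subst h3; decide
  by_cases h4 : m = "fdv"
  · subst h4; decide
  by_cases h5 : m = "price_change_24h"
  · subst h5; decide
  by_cases h6 : m = "price_change_pct_24h"
  · subst h6; decide
  by_cases h7 : m = "rsi"
  · subst h7; decide
  by_cases h8 : m = "macd"
  · subst h8; decide
  by_cases h9 : m = "bollinger_upper"
  · subst h9; decide
  by_cases h10 : m = "bollinger_lower"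
  · subst h10; decide
  by_cases h11 : m = "ema_20"
  · subst h11; decide
  by_cases h12 : m = "sma_50"
  · subst h12; decide
  by_cases h13 : m = "sma_200"
  · subst h13; decide
  by_cases h14 : m = "twitter_followers"
  · subst h14; decide
  by_cases h15 : m = "reddit_subscribers"
  · subst h15; decide
  by_cases h16 : m = "telegram_members"
  · subst h16; decide
  by_cases h17 : m = "social_score"
  · subst h17; decide
  by_cases h18 : m = "sentiment_score"
  · subst h18; decide
  by_cases h19 : m = "security_score"
  · subst h19; decide
  by_cases h20 : m = "honeypot"
  · subst h20; decide
  by_cases h21 : m = "rugpull_risk"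
  · subst h21; decide
  by_cases h22 : m = "contract_verified"
  · subst h22; decide
  by_cases h23 : m = "tvl"
  · subst h23; decide
  by_cases h24 : m = "liquidity"
  · subst h24; decide
  by_cases h25 : m = "apy"
  · subst h25; decide
  by_cases h26 : m = "pool_count"
  · subst h26; decide
  by_cases h27 : m = "whale_transactions"
  · subst h27; decide
  by_cases h28 : m = "whale_holdings"
  · subst h28; decide
  by_cases h29 : m = "smart_money_flow"
  · subst h29; decide
  have hall : pvSortedMetrics.all (fun p => p.1 != m) = true := by
    simp [pvSortedMetrics, bne_iff_ne,
      Ne.symm h1, Ne.symm h2, Ne.symm h3, Ne.symm h4, Ne.symm h5, Ne.symm h6, Ne.symm h7,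
      Ne.symm h8, Ne.symm h9, Ne.symm h10, Ne.symm h11, Ne.symm h12, Ne.symm h13, Ne.symm h14,
      Ne.symm h15, Ne.symm h16, Ne.symm h17, Ne.symm h18, Ne.symm h19, Ne.symm h20, Ne.symm h21,
      Ne.symm h22, Ne.symm h23, Ne.symm h24, Ne.symm h25, Ne.symm h26, Ne.symm h27, Ne.symm h28,
      Ne.symm h29]
  rw [pvAltNotFound m hall]
  simp [get_metric_category_py, pvLoopA, pvCategoriesA, h1, h2, h3, h4, h5, h6, h7, h8, h9, h10, h11, h12, h13, h14, h15, h16, h17, h18, h19, h20, h21, h22, h23, h24, h25, h26, h27, h28, h29]
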